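-- pv_equiv track=rewrite | github.com/JuanImpata/Programacion-1 | Entregable_Parcial_2.py | encontrar_patrones
-- ===== SOURCE A (Python) =====
-- def encontrar_patrones(ventas):
--     if not ventas:
--         return "sin datos"
--     if all(ventas[i] < ventas[i + 1] for i in range(len(ventas) - 1)):
--         return "creciente"
--     if all(ventas[i] > ventas[i + 1] for i in range(len(ventas) - 1)):
--         return "decreciente"
--     if all(ventas[i] == ventas[0] for i in range(len(ventas))):
--         return "estable"
--     return "variable"
-- ===== SOURCE B (Python) =====
-- def encontrar_patrones(ventas):
--     if not ventas:
--         return "sin datos"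
--     first = ventas[0]
--     inc = dec = stable = True
--     for prev, cur in zip(ventas, ventas[1:]):
--         inc = inc and prev < cur
--         dec = dec and prev > cur
--         stable = stable and cur == first
--     if inc:
--         return "creciente"
--     if dec:
--         return "decreciente"
--     if stable:
--         return "estable"
--     return "variable"
-- ===== Notes on version B (the rewrite author's own statement) =====
-- stated objective: simpler
-- what changed: Replaced A's three separate full scans (three all(...) generator passes over index ranges) by a single pass over adjacent pairs maintaining three booleans, keeping A's priority order creciente/decreciente/estable/variable.
import Mathlib
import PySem

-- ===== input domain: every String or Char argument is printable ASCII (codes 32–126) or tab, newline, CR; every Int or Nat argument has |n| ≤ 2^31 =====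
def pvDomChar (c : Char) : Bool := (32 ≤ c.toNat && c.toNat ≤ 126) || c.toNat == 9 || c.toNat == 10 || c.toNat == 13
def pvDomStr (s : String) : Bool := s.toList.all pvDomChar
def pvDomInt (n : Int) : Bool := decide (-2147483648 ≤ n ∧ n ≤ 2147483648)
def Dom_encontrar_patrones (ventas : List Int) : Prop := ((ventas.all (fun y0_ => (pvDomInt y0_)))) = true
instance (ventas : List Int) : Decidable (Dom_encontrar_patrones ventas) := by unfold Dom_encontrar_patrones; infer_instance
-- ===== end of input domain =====

-- B replaces A's three separate scans by one pass over adjacent pairs keeping three booleans (objective: simpler).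

-- ===== PORT A =====
-- every index i and i+1 used below is in range, so pyGetD is exact for ventas[i]
def encontrar_patrones (ventas : List Int) : String :=
  if ventas = [] then "sin datos"
  else if (PySem.List.pyRange 0 ((ventas.length : Int) - 1) 1).all
      (fun i => decide (PySem.List.pyGetD ventas i 0 < PySem.List.pyGetD ventas (i + 1) 0)) then "creciente"
  else if (PySem.List.pyRange 0 ((ventas.length : Int) - 1) 1).all
      (fun i => decide (PySem.List.pyGetD ventas (i + 1) 0 < PySem.List.pyGetD ventas i 0)) then "decreciente"
  else if (PySem.List.pyRange 0 (ventas.length : Int) 1).all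
      (fun i => PySem.List.pyGetD ventas i 0 == PySem.List.pyGetD ventas 0 0) then "estable"
  else "variable"

-- ===== PORT B =====
-- ventas.tail = ventas[1:] (exact on lists); the fold is Source B's single loop over zip(ventas, ventas[1:])
def encontrar_patrones_alt (ventas : List Int) : String :=
  match ventas with
  | [] => "sin datos"
  | first :: _ =>
    let s := (ventas.zip ventas.tail).foldl
      (fun (s : Bool × Bool × Bool) p =>
        (s.1 && decide (p.1 < p.2), s.2.1 && decide (p.2 < p.1), s.2.2 && (p.2 == first)))
      (true, true, true)
    if s.1 then "creciente"
    else if s.2.1 then "decreciente"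
    else if s.2.2 then "estable"
    else "variable"

-- ===== PRECONDITION & SPEC =====
def Spec_encontrar_patrones (ventas : List Int) (out : String) : Prop := out = encontrar_patrones_alt ventas
instance (ventas : List Int) (out : String) : Decidable (Spec_encontrar_patrones ventas out) := by unfold Spec_encontrar_patrones; infer_instance

-- ===== CLAIM (what is proved, stated in full; the proofs are below) =====
def Claim_equal_encontrar_patrones : Prop := ∀ (ventas : List Int), Dom_encontrar_patrones ventas → Spec_encontrar_patrones ventas (encontrar_patrones ventas)

-- ===== LEMMAS AND PROOFS =====

theorem fold3_all {α : Type} (f g h : α → Bool) (l : List α) (b1 b2 b3 : Bool) :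
    l.foldl (fun (s : Bool × Bool × Bool) p => (s.1 && f p, s.2.1 && g p, s.2.2 && h p)) (b1, b2, b3)
      = (b1 && l.all f, b2 && l.all g, b3 && l.all h) := by
  induction l generalizing b1 b2 b3 with
  | nil => simp
  | cons x t ih => simp [List.foldl_cons, ih, Bool.and_assoc]

theorem range_adj_all (xs : List Int) (f : Int → Int → Bool) :
    (List.range (xs.length - 1)).all
        (fun i => f (xs.getD i 0) (xs.getD (i + 1) 0))
      = (xs.zip xs.tail).all (fun p => f p.1 p.2) := by
  induction xs with
  | nil => simp
  | cons a t ih =>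
    cases t with
    | nil => simp
    | cons b t' =>
      have h := ih
      simp only [List.length_cons, Nat.add_sub_cancel] at h ⊢
      rw [List.range_succ_eq_map]
      simp only [List.all_cons, List.all_map]
      simp only [List.tail_cons, List.zip_cons_cons, List.all_cons] at h ⊢
      rw [← h]
      rfl

theorem pyRange_adj_all (xs : List Int) (f : Int → Int → Bool) :
    (PySem.List.pyRange 0 ((xs.length : Int) - 1) 1).all
        (fun i => f (PySem.List.pyGetD xs i 0) (PySem.List.pyGetD xs (i + 1) 0))
      = (xs.zip xs.tail).all (fun p => f p.1 p.2) := by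
  rw [PySem.List.pyRange_one, ← range_adj_all xs f]
  rcases Nat.eq_zero_or_pos xs.length with h | h
  · simp [h]
  · have : (((xs.length : Int) - 1) - 0).toNat = xs.length - 1 := by omega
    rw [this, List.all_map]
    apply congrArg
    funext k
    have h1 : PySem.List.pyGetD xs ((0 : Int) + (k : Int)) 0 = xs.getD k 0 := by
      simp
    have h2 : PySem.List.pyGetD xs ((0 : Int) + (k : Int) + 1) 0 = xs.getD (k + 1) 0 := by
      have e : (0 : Int) + (k : Int) + 1 = ((k + 1 : Nat) : Int) := by push_cast; ring
      rw [e, PySem.List.pyGetD_natCast]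
    simp only [Function.comp_apply]
    rw [h1, h2]

theorem pyRange_all_elems (xs : List Int) (g : Int → Bool) :
    (PySem.List.pyRange 0 (xs.length : Int) 1).all
        (fun i => g (PySem.List.pyGetD xs i 0)) = xs.all g := by
  have h := PySem.List.map_pyGetD_pyRange_zero xs (0 : Int)
  conv_rhs => rw [← h]
  simp [List.all_map, Function.comp_def]

theorem all_eq_head (c a : Int) (t : List Int) :
    ((a :: t).zip t).all (fun p => p.2 == c) = t.all (fun x => x == c) := by
  induction t generalizing a with
  | nil => rfl
  | cons b t' ih => simp [List.zip_cons_cons, ih b]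

-- ===== VERDICT (by name: the statement is the Claim_ definition above) =====
theorem encontrar_patrones_spec : Claim_equal_encontrar_patrones := by
  intro ventas _
  unfold Spec_encontrar_patrones encontrar_patrones encontrar_patrones_alt
  cases ventas with
  | nil => simp
  | cons a t =>
    simp only [if_neg (List.cons_ne_nil a t)]
    rw [fold3_all]
    simp only [Bool.true_and]
    rw [pyRange_adj_all (a :: t) (fun x y => decide (x < y)),
        pyRange_adj_all (a :: t) (fun x y => decide (y < x)),
        pyRange_all_elems (a :: t) (fun x => x == PySem.List.pyGetD (a :: t) 0 0)]
    have hd : PySem.List.pyGetD (a :: t) 0 0 = a := PySem.List.pyGetD_zero_cons a t 0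
    simp only [hd, List.tail_cons, List.all_cons, BEq.rfl, Bool.true_and,
      all_eq_head a a t]
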